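-- pv_equiv track=rewrite | github.com/sh8094/- | DATA_E.py | find_dup_row
-- ===== SOURCE A (Python) =====
-- def find_dup_row(new_dict):
--     dup_row =[]
--     set_row=[]
--     dict_list = [list(x) for x in zip(*new_dict.values())]
--     dict_list.insert(0, list(new_dict.keys()))
--     for index, val in enumerate(dict_list):
--         if val in set_row:
--             dup_row.append(index)
--         else:
--             set_row.append(val)
--     return dup_row
-- ===== SOURCE B (Python) =====
-- def find_dup_row(new_dict):
--     rows = [tuple(new_dict.keys())]
--     rows.extend(zip(*new_dict.values()))
--     groups = {}
--     for i, r in enumerate(rows):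
--         groups.setdefault(r, []).append(i)
--     out = []
--     for idxs in groups.values():
--         out.extend(idxs[1:])
--     return sorted(out)
-- ===== Notes on version B (the rewrite author's own statement) =====
-- stated objective: alternative
-- what changed: Replaces the scan-and-grow 'seen' list (a linear membership test per row, O(n^2) row comparisons) with a hash-table pass grouping each row to its index list, then a second pass collecting every non-first index per group and sorting the result.
import Mathlib
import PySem

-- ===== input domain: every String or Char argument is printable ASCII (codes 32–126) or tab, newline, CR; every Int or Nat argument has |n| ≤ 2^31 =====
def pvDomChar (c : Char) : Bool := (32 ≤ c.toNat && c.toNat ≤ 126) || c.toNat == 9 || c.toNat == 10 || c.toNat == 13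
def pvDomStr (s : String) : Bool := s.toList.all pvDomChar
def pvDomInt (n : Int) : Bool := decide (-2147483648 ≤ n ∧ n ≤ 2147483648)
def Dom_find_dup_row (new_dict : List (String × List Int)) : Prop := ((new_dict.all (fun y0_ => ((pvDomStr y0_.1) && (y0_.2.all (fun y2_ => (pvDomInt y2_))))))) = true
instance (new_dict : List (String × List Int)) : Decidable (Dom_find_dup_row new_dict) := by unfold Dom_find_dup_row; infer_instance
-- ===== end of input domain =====

-- B replaces A's scan-and-grow 'seen' list by a dict grouping each row to its index list,
-- then collects every non-first index per group and sorts; same return value (alternative decomposition).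

-- A row of dict_list: the keys row (list of strings) is encoded (ks, []), a value row
-- (list of ints, one per key) is encoded ([], vs).  This encoding preserves Python list/tuple
-- equality: a string row and an int row compare equal in Python iff both are empty, which is
-- exactly when the encodings coincide.
abbrev PyRow : Type := List String × List Int

-- zip(*xss) for lists of ints (rows returned as lists)
def pyZip (xss : List (List Int)) : List (List Int) :=
  if _h1 : xss = [] then []
  else if _h2 : xss.any (·.isEmpty) then []
  else (xss.map (fun l => l.headI)) :: pyZip (xss.map (·.tail))
termination_by xss.headI.length
decreasing_by
  cases xss with
  | nil => exact absurd rfl _h1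
  | cons x rest =>
    simp only [List.headI]
    have hx : x ≠ [] := by
      intro h; exact _h2 (by simp [h])
    cases x with
    | nil => exact absurd rfl hx
    | cons a t => simp

-- ===== PORT A =====
def find_dup_row (new_dict : List (String × List Int)) : List Int :=
  let dict_list : List PyRow := (pyZip (new_dict.map (·.2))).map (fun r => (([] : List String), r))
  let dict_list : List PyRow := PySem.List.insert dict_list 0 ((new_dict.map (·.1), ([] : List Int)) : PyRow)
  let res := (PySem.List.enumerate dict_list 0).foldl
    (fun (st : List Int × List PyRow) p =>
      if p.2 ∈ st.2 then (st.1 ++ [p.1], st.2) else (st.1, st.2 ++ [p.2]))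
    ([], [])
  res.1

-- ===== PORT B =====
def find_dup_row_alt (new_dict : List (String × List Int)) : List Int :=
  let rows : List PyRow :=
    ((new_dict.map (·.1), ([] : List Int)) : PyRow)
      :: (pyZip (new_dict.map (·.2))).map (fun r => (([] : List String), r))
  let groups : PySem.Dict PyRow (List Int) :=
    (PySem.List.enumerate rows 0).foldl
      (fun d p => d.modify p.2 [] (· ++ [p.1])) PySem.Dict.empty
  let out := groups.values.foldl (fun acc idxs => acc ++ idxs.tail) []
  PySem.List.sorted out (fun x => x) false

-- ===== PRECONDITION & SPEC =====
def Spec_find_dup_row (new_dict : List (String × List Int)) (out : List Int) : Prop := out = find_dup_row_alt new_dict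
instance (new_dict : List (String × List Int)) (out : List Int) : Decidable (Spec_find_dup_row new_dict out) := by unfold Spec_find_dup_row; infer_instance

-- ===== CLAIM (what is proved, stated in full; the proofs are below) =====
def Claim_equal_find_dup_row : Prop := ∀ (new_dict : List (String × List Int)), Dom_find_dup_row new_dict → Spec_find_dup_row new_dict (find_dup_row new_dict)

-- ===== LEMMAS AND PROOFS =====

-- A's loop, as a recursion over the rows with the processed prefix as accumulator
def dupIdx : List PyRow → List PyRow → Int → List Int
  | [], _, _ => []
  | v :: t, pref, s =>
      if v ∈ pref then s :: dupIdx t (pref ++ [v]) (s + 1)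
      else dupIdx t (pref ++ [v]) (s + 1)

lemma dupIdx_lb (l : List PyRow) : ∀ (pref : List PyRow) (s : Int), ∀ i ∈ dupIdx l pref s, s ≤ i := by
  induction l with
  | nil => intro pref s i h; simp [dupIdx] at h
  | cons v t ih =>
    intro pref s i h
    simp only [dupIdx] at h
    split at h
    · rcases List.mem_cons.1 h with h | h
      · omega
      · have := ih (pref ++ [v]) (s+1) i h; omega
    · have := ih (pref ++ [v]) (s+1) i h; omega

lemma dupIdx_pairwise (l : List PyRow) : ∀ (pref : List PyRow) (s : Int),
    (dupIdx l pref s).Pairwise (· < ·) := by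
  induction l with
  | nil => intro pref s; simp [dupIdx]
  | cons v t ih =>
    intro pref s
    simp only [dupIdx]
    split
    · refine List.Pairwise.cons ?_ (ih _ _)
      intro i hi
      have := dupIdx_lb t (pref ++ [v]) (s+1) i hi; omega
    · exact ih _ _

lemma foldA_eq (l : List PyRow) : ∀ (s : Int) (dup : List Int) (seen pref : List PyRow),
    (∀ x, x ∈ seen ↔ x ∈ pref) →
    ((PySem.List.enumerate l s).foldl
      (fun (st : List Int × List PyRow) p =>
        if p.2 ∈ st.2 then (st.1 ++ [p.1], st.2) else (st.1, st.2 ++ [p.2]))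
      (dup, seen)).1 = dup ++ dupIdx l pref s := by
  induction l with
  | nil => intro s dup seen pref h; simp [dupIdx, PySem.List.enumerate_nil]
  | cons v t ih =>
    intro s dup seen pref h
    rw [PySem.List.enumerate_cons]
    simp only [List.foldl_cons, dupIdx]
    by_cases hv : v ∈ pref
    · rw [if_pos ((h v).2 hv), if_pos hv]
      rw [ih (s+1) (dup ++ [s]) seen (pref ++ [v])
        (by intro x; rw [h x]; simp only [List.mem_append, List.mem_singleton]
            exact ⟨Or.inl, by rintro (hx|rfl); exacts [hx, hv]⟩)]
      simp
    · rw [if_neg (fun hc => hv ((h v).1 hc)), if_neg hv]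
      exact ih (s+1) dup (seen ++ [v]) (pref ++ [v])
        (by intro x; simp [h x])

lemma mem_dupIdx (l : List PyRow) : ∀ (pref : List PyRow) (s i : Int),
    (i ∈ dupIdx l pref s ↔
      ∃ (k : Nat) (h : k < l.length), i = s + k ∧ l[k] ∈ pref ++ l.take k) := by
  induction l with
  | nil => intro pref s i; simp [dupIdx]
  | cons v t ih =>
    intro pref s i
    simp only [dupIdx]
    constructor
    · intro h
      have hsplit : (v ∈ pref ∧ (i = s ∨ i ∈ dupIdx t (pref ++ [v]) (s+1))) ∨
          (v ∉ pref ∧ i ∈ dupIdx t (pref ++ [v]) (s+1)) := by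
        split at h
        · exact Or.inl ⟨‹_›, List.mem_cons.1 h⟩
        · exact Or.inr ⟨‹_›, h⟩
      rcases hsplit with ⟨hv, h | h⟩ | ⟨hv, h⟩
      · exact ⟨0, by simp, by simpa using h, by simpa using hv⟩
      all_goals {
        rcases (ih (pref ++ [v]) (s+1) i).1 h with ⟨k, hk, hi, hm⟩
        refine ⟨k+1, by simpa using hk, by omega, ?_⟩
        simpa [List.append_assoc] using hm }
    · rintro ⟨k, hk, hi, hm⟩
      cases k with
      | zero =>
        simp at hm hi
        rw [if_pos hm]
        simp [hi]
      | succ k =>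
        have hmem : i ∈ dupIdx t (pref ++ [v]) (s+1) := by
          apply (ih (pref ++ [v]) (s+1) i).2
          refine ⟨k, by simpa using hk, by omega, ?_⟩
          simpa [List.append_assoc] using hm
        split
        · exact List.mem_cons_of_mem _ hmem
        · exact hmem


def indicesOf (rows : List PyRow) (r : PyRow) : List Int :=
  ((PySem.List.enumerate rows 0).filter (fun p => p.2 == r)).map (·.1)

-- dict built by B's first loop
lemma groups_getD (rows : List PyRow) (r : PyRow) :
    ((PySem.List.enumerate rows 0).foldl
      (fun (d : PySem.Dict PyRow (List Int)) p => d.modify p.2 [] (· ++ [p.1]))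
      PySem.Dict.empty).getD r [] = indicesOf rows r := by
  have h : ((PySem.List.enumerate rows 0).foldl
      (fun (d : PySem.Dict PyRow (List Int)) p => d.modify p.2 [] (· ++ [p.1]))
      PySem.Dict.empty)
      = (((PySem.List.enumerate rows 0).map Prod.swap).foldl
      (fun (d : PySem.Dict PyRow (List Int)) p => d.modify p.1 [] (· ++ [p.2]))
      PySem.Dict.empty) := by
    rw [List.foldl_map]; rfl
  rw [h, PySem.Dict.getD_foldl_modify_append]
  simp [indicesOf, List.filter_map, List.map_map, Function.comp_def, Prod.swap]

lemma groups_keys (rows : List PyRow) :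
    ((PySem.List.enumerate rows 0).foldl
      (fun (d : PySem.Dict PyRow (List Int)) p => d.modify p.2 [] (· ++ [p.1]))
      PySem.Dict.empty).keys = PySem.Set.ofList rows := by
  rw [PySem.Dict.keys_foldl_modify_key]
  simp [PySem.List.map_snd_enumerate, PySem.Dict.keys_empty,
    PySem.Set.update, PySem.Set.ofList]

lemma groups_values (rows : List PyRow) :
    ((PySem.List.enumerate rows 0).foldl
      (fun (d : PySem.Dict PyRow (List Int)) p => d.modify p.2 [] (· ++ [p.1]))
      PySem.Dict.empty).values = (PySem.Set.ofList rows).map (indicesOf rows) := by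
  rw [PySem.Dict.values_eq_map_keys _ (by rw [groups_keys]; exact PySem.Set.nodup_ofList rows) []]
  rw [groups_keys]
  exact List.map_congr_left (fun r _ => groups_getD rows r)

lemma foldl_append_tails (ls : List (List Int)) : ∀ init : List Int,
    ls.foldl (fun a x => a ++ x.tail) init = init ++ (ls.map List.tail).flatten := by
  induction ls with
  | nil => intro init; simp
  | cons x t ih => intro init; simp [ih, List.append_assoc]

lemma pairwise_indicesOf (rows : List PyRow) (r : PyRow) :
    (indicesOf rows r).Pairwise (· < ·) := by
  unfold indicesOf
  rw [List.pairwise_map]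
  exact (PySem.List.pairwise_lt_enumerate rows 0).filter _

lemma mem_indicesOf (rows : List PyRow) (r : PyRow) (i : Int) :
    i ∈ indicesOf rows r ↔ ∃ (k : Nat) (h : k < rows.length), i = (k : Int) ∧ rows[k] = r := by
  simp only [indicesOf, List.mem_map, List.mem_filter, PySem.List.mem_enumerate_iff]
  constructor
  · rintro ⟨p, ⟨⟨k, hk, rfl⟩, hr⟩, rfl⟩
    exact ⟨k, hk, by simp, by simpa using hr⟩
  · rintro ⟨k, hk, rfl, hr⟩
    exact ⟨((k : Int), rows[k]), ⟨⟨k, hk, by simp⟩, by simpa using hr⟩, rfl⟩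

lemma tail_mem_pairwise {l : List Int} (h : l.Pairwise (· < ·)) (i : Int) :
    i ∈ l.tail ↔ i ∈ l ∧ ∃ j ∈ l, j < i := by
  cases l with
  | nil => simp
  | cons a t =>
    rw [List.pairwise_cons] at h
    constructor
    · intro ht
      exact ⟨List.mem_cons_of_mem _ ht, a, List.mem_cons_self, h.1 i ht⟩
    · rintro ⟨hi, j, hj, hji⟩
      rcases List.mem_cons.1 hi with rfl | hi
      · rcases List.mem_cons.1 hj with rfl | hj
        · omega
        · exact absurd (h.1 j hj) (by omega)
      · exact hi

lemma mem_take_iff (l : List PyRow) (m : Nat) (x : PyRow) :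
    x ∈ l.take m ↔ ∃ (j : Nat) (h : j < l.length), j < m ∧ l[j] = x := by
  rw [List.mem_iff_getElem]
  constructor
  · rintro ⟨j, hj, hx⟩
    have hlen : j < min m l.length := by simpa using hj
    exact ⟨j, by omega, by omega, by rw [← List.getElem_take]; exact hx⟩
  · rintro ⟨j, hj, hjm, hx⟩
    exact ⟨j, by simp; omega, by rw [List.getElem_take]; exact hx⟩

lemma nodup_outflat (rows : List PyRow) :
    (((PySem.Set.ofList rows).map (fun r => (indicesOf rows r).tail)).flatten).Nodup := by
  rw [List.nodup_flatten]
  constructor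
  · intro l hl
    obtain ⟨r, -, rfl⟩ := List.mem_map.1 hl
    exact ((pairwise_indicesOf rows r).tail).imp (fun h => ne_of_lt h)
  · rw [List.pairwise_map]
    refine (PySem.Set.nodup_ofList rows).imp ?_
    intro r1 r2 hne i h1 h2
    have m1 : i ∈ indicesOf rows r1 := List.mem_of_mem_tail h1
    have m2 : i ∈ indicesOf rows r2 := List.mem_of_mem_tail h2
    rcases (mem_indicesOf rows r1 i).1 m1 with ⟨k1, hk1, hi1, hr1⟩
    rcases (mem_indicesOf rows r2 i).1 m2 with ⟨k2, hk2, hi2, hr2⟩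
    have : k1 = k2 := by omega
    subst this
    exact hne (hr1 ▸ hr2 ▸ rfl)

lemma mem_outflat (rows : List PyRow) (i : Int) :
    i ∈ (((PySem.Set.ofList rows).map (fun r => (indicesOf rows r).tail)).flatten) ↔
      ∃ (k : Nat) (h : k < rows.length), i = (k : Int) ∧ rows[k] ∈ rows.take k := by
  simp only [List.mem_flatten, List.mem_map]
  constructor
  · rintro ⟨l, ⟨r, hr, rfl⟩, hi⟩
    rw [tail_mem_pairwise (pairwise_indicesOf rows r)] at hi
    rcases hi with ⟨hi, j, hj, hji⟩
    rcases (mem_indicesOf rows r i).1 hi with ⟨k, hk, rfl, hrk⟩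
    rcases (mem_indicesOf rows r j).1 hj with ⟨k', hk', rfl, hrk'⟩
    refine ⟨k, hk, rfl, ?_⟩
    rw [mem_take_iff]
    exact ⟨k', hk', by omega, by rw [hrk', hrk]⟩
  · rintro ⟨k, hk, rfl, htake⟩
    rcases (mem_take_iff rows k _).1 htake with ⟨k', hk', hk'k, hrk'⟩
    refine ⟨(indicesOf rows rows[k]).tail,
      ⟨rows[k], (PySem.Set.mem_ofList rows _).2 (List.getElem_mem hk), rfl⟩, ?_⟩
    rw [tail_mem_pairwise (pairwise_indicesOf rows _)]
    refine ⟨(mem_indicesOf rows _ _).2 ⟨k, hk, rfl, rfl⟩,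
      (k' : Int), (mem_indicesOf rows _ _).2 ⟨k', hk', rfl, hrk'⟩, by omega⟩

theorem find_dup_row_eq (nd : List (String × List Int)) :
    find_dup_row nd = find_dup_row_alt nd := by
  simp only [find_dup_row, find_dup_row_alt, PySem.List.insert_zero]
  rw [foldA_eq _ 0 [] [] [] (by simp)]
  rw [groups_values, foldl_append_tails, List.nil_append, List.nil_append, List.map_map]
  simp only [Function.comp_def]
  symm
  apply PySem.List.sorted_eq_of_perm_of_pairwise_lt
  · rw [List.perm_ext_iff_of_nodup
      ((dupIdx_pairwise _ _ _).imp (fun h => ne_of_lt h))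
      (nodup_outflat _)]
    intro a
    rw [mem_dupIdx, mem_outflat]
    simp only [zero_add, List.nil_append]
  · exact dupIdx_pairwise _ _ _

-- ===== VERDICT (by name: the statement is the Claim_ definition above) =====
theorem find_dup_row_spec : Claim_equal_find_dup_row := by
  intro nd _
  unfold Spec_find_dup_row
  exact find_dup_row_eq nd
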